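-- pv_equiv track=rewrite | github.com/piae-mentes-project/Localization-Tools | main.py | getLang
-- ===== SOURCE A (Python) =====
-- def getLang(heads:list,keyvalues:list):
--     langs={}
--     for i in range(len(keyvalues)):
--         key=""
--         for j in range(len(heads)):
--             if j==0:
--                 key=keyvalues[i][j]
--             else:
--                 if langs.get(heads[j],None)==None:
--                     langs[heads[j]]={}
--                 langs[heads[j]][key]=keyvalues[i][j]
--     return langs
-- ===== SOURCE B (Python) =====
-- def getLang(heads: list, keyvalues: list):
--     # column-major build: one inner dict per head column, made in full before storing
--     if not keyvalues:
--         return {}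
--     langs = {}
--     for j in range(1, len(heads)):
--         langs[heads[j]] = {row[0]: row[j] for row in keyvalues}
--     return langs
-- ===== Notes on version B (the rewrite author's own statement) =====
-- stated objective: alternative
-- what changed: B builds the result column-major: for each head column j it constructs the complete inner dict {row[0]: row[j]} in one comprehension and stores it, instead of A's row-major loop that interleaves a j==0 key branch with lazy get-based sub-dict initialisation; an explicit empty-keyvalues guard keeps the {} result.
import Mathlib
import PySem

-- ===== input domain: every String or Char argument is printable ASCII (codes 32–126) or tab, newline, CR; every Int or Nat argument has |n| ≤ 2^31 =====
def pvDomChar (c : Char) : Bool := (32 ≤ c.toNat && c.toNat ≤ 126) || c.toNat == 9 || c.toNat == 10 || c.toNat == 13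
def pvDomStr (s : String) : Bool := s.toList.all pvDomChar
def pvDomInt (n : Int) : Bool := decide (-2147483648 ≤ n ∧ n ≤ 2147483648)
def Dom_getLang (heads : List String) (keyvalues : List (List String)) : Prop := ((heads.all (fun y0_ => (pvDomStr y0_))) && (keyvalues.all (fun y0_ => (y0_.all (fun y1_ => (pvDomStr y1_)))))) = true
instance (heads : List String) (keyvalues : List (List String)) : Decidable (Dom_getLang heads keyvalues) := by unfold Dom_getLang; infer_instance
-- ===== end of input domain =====

-- B rebuilds the result column-by-column (one full inner dict per head) instead of A's
-- row-by-row interleaved build; objective: alternative decomposition, same asymptotic cost.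
-- ===== PORT A =====
-- the body of A's inner `for j in range(len(heads))` loop; state = (key, langs)
def galStep (heads : List String) (row : List String)
    (st : String × PySem.Dict String (PySem.Dict String String)) (j : Int) :
    String × PySem.Dict String (PySem.Dict String String) :=
  let key := st.1
  let langs := st.2
  if j == 0 then
    (PySem.List.pyGetD row j "", langs)
  else
    let h := PySem.List.pyGetD heads j ""
    -- `if langs.get(heads[j], None) == None: langs[heads[j]] = {}`
    let langs := if (langs.get? h).isNone then langs.insert h PySem.Dict.empty else langs
    -- `langs[heads[j]][key] = keyvalues[i][j]`
    (key, langs.insert h ((langs.getD h PySem.Dict.empty).insert key (PySem.List.pyGetD row j "")))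

-- one iteration of A's outer `for i in range(len(keyvalues))` loop (row = keyvalues[i])
def galRow (heads row : List String) (langs : PySem.Dict String (PySem.Dict String String)) :
    PySem.Dict String (PySem.Dict String String) :=
  ((PySem.List.pyRange 0 (PySem.List.len heads)).foldl (galStep heads row) ("", langs)).2

def getLang (heads : List String) (keyvalues : List (List String)) :
    List (String × List (String × String)) :=
  let langs := (PySem.List.pyRange 0 (PySem.List.len keyvalues)).foldl
    (fun langs i => galRow heads (PySem.List.pyGetD keyvalues i []) langs) PySem.Dict.empty
  langs.items.map (fun p => (p.1, p.2.items))

-- ===== PORT B =====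
-- `{row[0]: row[j] for row in keyvalues}` — the full inner dict for column j
def galCol (keyvalues : List (List String)) (j : Int) : PySem.Dict String String :=
  keyvalues.foldl
    (fun d row => d.insert (PySem.List.pyGetD row 0 "") (PySem.List.pyGetD row j ""))
    PySem.Dict.empty

def getLang_alt (heads : List String) (keyvalues : List (List String)) :
    List (String × List (String × String)) :=
  if keyvalues.isEmpty then []
  else
    let langs := (PySem.List.pyRange 1 (PySem.List.len heads)).foldl
      (fun langs j => langs.insert (PySem.List.pyGetD heads j "") (galCol keyvalues j))
      PySem.Dict.empty
    langs.items.map (fun p => (p.1, p.2.items))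

-- ===== PRECONDITION & SPEC =====
-- Pre_ excludes exactly the inputs where Python A raises IndexError: some row shorter than heads.
def Pre_getLang (heads : List String) (keyvalues : List (List String)) : Prop :=
  ∀ row ∈ keyvalues, heads.length ≤ row.length
instance (heads : List String) (keyvalues : List (List String)) : Decidable (Pre_getLang heads keyvalues) := by unfold Pre_getLang; infer_instance
def pvWitness_getLang : List String × List (List String) :=
  (["key", "en", "fr"], [["a", "x", "u"], ["b", "y", "v"]])
def Spec_getLang (heads : List String) (keyvalues : List (List String)) (out : List (String × List (String × String))) : Prop := out = getLang_alt heads keyvalues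
instance (heads : List String) (keyvalues : List (List String)) (out : List (String × List (String × String))) : Decidable (Spec_getLang heads keyvalues out) := by unfold Spec_getLang; infer_instance

-- ===== CLAIM (what is proved, stated in full; the proofs are below) =====
def Claim_equal_getLang : Prop := ∀ (heads : List String) (keyvalues : List (List String)), Dom_getLang heads keyvalues → Pre_getLang heads keyvalues → Spec_getLang heads keyvalues (getLang heads keyvalues)

-- ===== LEMMAS AND PROOFS =====

-- proof-side abbreviations
def pvHStr (heads : List String) (j : Int) : String := PySem.List.pyGetD heads j ""
def pvKey (row : List String) : String := PySem.List.pyGetD row 0 ""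
def pvVal (row : List String) (j : Int) : String := PySem.List.pyGetD row j ""
-- the effect of A's inner-loop body for j ≥ 1, with the key already fixed
def pvMod (heads row : List String)
    (L : PySem.Dict String (PySem.Dict String String)) (j : Int) :
    PySem.Dict String (PySem.Dict String String) :=
  L.modify (pvHStr heads j) PySem.Dict.empty (fun d => d.insert (pvKey row) (pvVal row j))

theorem galStep_ne_zero (heads row : List String) (k : String)
    (L : PySem.Dict String (PySem.Dict String String)) (j : Int) (hj : j ≠ 0) :
    galStep heads row (k, L) j
      = (k, L.modify (pvHStr heads j) PySem.Dict.empty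
          (fun d => d.insert k (pvVal row j))) := by
  unfold galStep PySem.Dict.modify pvHStr pvVal
  simp only [show (j == 0) = false from by simpa using hj, if_false, Bool.false_eq_true]
  cases hget : L.get? (PySem.List.pyGetD heads j "") with
  | none =>
      simp [PySem.Dict.getD_insert_self, PySem.Dict.insert_insert_self,
        PySem.Dict.getD_of_get?_eq_none _ _ hget]
  | some d =>
      simp [PySem.Dict.getD_of_get?_eq_some _ _ hget]

theorem galStep_fold_aux (heads row : List String) (l : List Int)
    (hl : ∀ j ∈ l, j ≠ 0) (k : String) (L : PySem.Dict String (PySem.Dict String String)) :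
    l.foldl (galStep heads row) (k, L)
      = (k, l.foldl (fun L j => L.modify (pvHStr heads j) PySem.Dict.empty
          (fun d => d.insert k (pvVal row j))) L) := by
  induction l generalizing L with
  | nil => rfl
  | cons j t ih =>
      have hj : j ≠ 0 := hl j (by simp)
      simp only [List.foldl_cons, galStep_ne_zero heads row k L j hj]
      exact ih (fun j hj' => hl j (List.mem_cons_of_mem _ hj')) _

-- galRow = fold of pvMod over pyRange 1 (len heads)
theorem galRow_eq (heads row : List String) (L : PySem.Dict String (PySem.Dict String String)) :
    galRow heads row L = (PySem.List.pyRange 1 (PySem.List.len heads)).foldl (pvMod heads row) L := by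
  unfold galRow
  by_cases hh : heads = []
  · subst hh; rfl
  · have hlt : (0 : Int) < PySem.List.len heads := by
      simp [PySem.List.len]
      exact List.length_pos_iff.mpr hh
    rw [PySem.List.pyRange_one_cons hlt]
    simp only [List.foldl_cons]
    have h0 : galStep heads row ("", L) 0 = (pvVal row 0, L) := rfl
    rw [h0, galStep_fold_aux heads row _ (fun j hj => by
      rcases PySem.List.mem_pyRange_one.mp hj with ⟨h1, _⟩; omega)]
    rfl

-- getD of A's row fold, per head key
theorem grp1 (heads row : List String) (l : List Int)
    (L : PySem.Dict String (PySem.Dict String String)) (h : String) :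
    (l.foldl (pvMod heads row) L).getD h PySem.Dict.empty
      = (l.filter (fun j => pvHStr heads j == h)).foldl
          (fun d j => d.insert (pvKey row) (pvVal row j)) (L.getD h PySem.Dict.empty) := by
  induction l generalizing L with
  | nil => rfl
  | cons j t ih =>
      simp only [List.foldl_cons, List.filter_cons]
      by_cases hj : pvHStr heads j = h
      · simp only [hj, beq_self_eq_true, if_true, List.foldl_cons, ih]
        rw [show pvMod heads row L j = L.modify h PySem.Dict.empty
            (fun d => d.insert (pvKey row) (pvVal row j)) from by rw [pvMod, hj],
          PySem.Dict.getD_modify_self]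
      · simp only [show (pvHStr heads j == h) = false from by simpa using hj,
          Bool.false_eq_true, if_false, ih]
        rw [show (pvMod heads row L j).getD h PySem.Dict.empty
            = L.getD h PySem.Dict.empty from
          PySem.Dict.getD_modify_of_ne L _ _ (fun he => hj he.symm)]

-- getD of A's full nested fold
theorem grp2 (heads : List String) (rows : List (List String)) (js : List Int)
    (L0 : PySem.Dict String (PySem.Dict String String)) (h : String) :
    (rows.foldl (fun L r => js.foldl (pvMod heads r) L) L0).getD h PySem.Dict.empty
      = rows.foldl (fun d r => (js.filter (fun j => pvHStr heads j == h)).foldl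
          (fun d j => d.insert (pvKey r) (pvVal r j)) d) (L0.getD h PySem.Dict.empty) := by
  induction rows generalizing L0 with
  | nil => rfl
  | cons r rest ih =>
      simp only [List.foldl_cons, ih, grp1]

-- getD of B's fold
theorem ins1 (keyf : Int → String) (g : Int → PySem.Dict String String) (l : List Int)
    (L : PySem.Dict String (PySem.Dict String String)) (h : String) :
    (l.foldl (fun L j => L.insert (keyf j) (g j)) L).getD h PySem.Dict.empty
      = (l.filter (fun j => keyf j == h)).foldl (fun _ j => g j)
          (L.getD h PySem.Dict.empty) := by
  induction l generalizing L with
  | nil => rfl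
  | cons j t ih =>
      simp only [List.foldl_cons, List.filter_cons]
      by_cases hj : keyf j = h
      · simp only [hj, beq_self_eq_true, if_true, List.foldl_cons, ih]
        rw [PySem.Dict.getD_insert_self]
      · simp only [show (keyf j == h) = false from by simpa using hj,
          Bool.false_eq_true, if_false, ih,
          PySem.Dict.getD_insert_of_ne L _ _ (fun he => hj he.symm)]

theorem fold_const {β : Type} (l : List Int) (hl : l ≠ []) (g : Int → β) (init : β) :
    l.foldl (fun _ j => g j) init = g (l.getLast hl) := by
  induction l generalizing init with
  | nil => exact absurd rfl hl
  | cons j t ih =>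
      cases t with
      | nil => rfl
      | cons y u => simpa using ih (List.cons_ne_nil y u) (g j)

theorem fold_same_key (l : List Int) (hl : l ≠ []) (d : PySem.Dict String String)
    (k : String) (v : Int → String) :
    l.foldl (fun d j => d.insert k (v j)) d = d.insert k (v (l.getLast hl)) := by
  induction l generalizing d with
  | nil => exact absurd rfl hl
  | cons j t ih =>
      cases t with
      | nil => rfl
      | cons y u =>
          rw [show List.foldl (fun d j => d.insert k (v j)) d (j :: y :: u)
              = List.foldl (fun d j => d.insert k (v j)) (d.insert k (v j)) (y :: u) from rfl,
            ih (List.cons_ne_nil y u), PySem.Dict.insert_insert_self]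
          rfl

-- pointwise agreement of the two builds for one head key
theorem pw (l : List Int) (rows : List (List String)) :
    rows.foldl (fun d r => l.foldl (fun d j => d.insert (pvKey r) (pvVal r j)) d)
        PySem.Dict.empty
      = l.foldl (fun _ j => galCol rows j) PySem.Dict.empty := by
  by_cases hl : l = []
  · subst hl; simp
  · rw [fold_const l hl, PySem.List.foldl_congr_mem rows _
      (fun d r => d.insert (pvKey r) (pvVal r (l.getLast hl))) _
      (fun acc r _ => fold_same_key l hl acc (pvKey r) (pvVal r))]
    rfl

-- keys of A's nested fold
theorem keysA_eq (heads : List String) (rows : List (List String)) (js : List Int)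
    (L0 : PySem.Dict String (PySem.Dict String String)) :
    (rows.foldl (fun L r => js.foldl (pvMod heads r) L) L0).keys
      = rows.foldl (fun ks _ => PySem.Set.update ks (js.map (pvHStr heads))) L0.keys := by
  induction rows generalizing L0 with
  | nil => rfl
  | cons r rest ih =>
      simp only [List.foldl_cons, ih]
      rw [show (js.foldl (pvMod heads r) L0).keys
          = PySem.Set.update L0.keys (js.map (pvHStr heads)) from
        PySem.Dict.keys_foldl_modify_key js (pvHStr heads) PySem.Dict.empty
          (fun _ j d => d.insert (pvKey r) (pvVal r j)) L0]

theorem upd_fix (l : List String) (S : PySem.Set String) (hS : ∀ x ∈ l, x ∈ S) :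
    PySem.Set.update S l = S := by
  induction l generalizing S with
  | nil => rfl
  | cons x t ih =>
      rw [show PySem.Set.update S (x :: t) = PySem.Set.update (S.add x) t from rfl,
        PySem.Set.add_of_mem (hS x (by simp))]
      exact ih S (fun y hy => hS y (List.mem_cons_of_mem _ hy))

theorem nodupA (heads : List String) (rows : List (List String)) (js : List Int)
    (L0 : PySem.Dict String (PySem.Dict String String)) (h0 : L0.keys.Nodup) :
    (rows.foldl (fun L r => js.foldl (pvMod heads r) L) L0).keys.Nodup := by
  induction rows generalizing L0 with
  | nil => exact h0
  | cons r rest ih =>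
      exact ih _ (PySem.Dict.nodup_keys_foldl_modify_key js (pvHStr heads)
        PySem.Dict.empty (fun _ j d => d.insert (pvKey r) (pvVal r j)) L0 h0)

theorem fix_fold {gamma : Type} (rest : List gamma) (l : List String) (S : PySem.Set String)
    (hS : ∀ x ∈ l, x ∈ S) :
    rest.foldl (fun ks _ => PySem.Set.update ks l) S = S := by
  induction rest with
  | nil => rfl
  | cons a t ih => simp only [List.foldl_cons, upd_fix l S hS]; exact ih

-- the central dict-level equality, for a nonempty row list
theorem main_dict (heads : List String) (rows : List (List String)) (js : List Int)
    (hr : rows ≠ []) :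
    rows.foldl (fun L r => js.foldl (pvMod heads r) L) PySem.Dict.empty
      = js.foldl (fun L j => L.insert (pvHStr heads j) (galCol rows j)) PySem.Dict.empty := by
  obtain ⟨r0, rest, rfl⟩ : ∃ r0 rest, rows = r0 :: rest := by
    cases rows with
    | nil => exact absurd rfl hr
    | cons a b => exact ⟨a, b, rfl⟩
  apply PySem.Dict.ext
  have ndA : (List.foldl (fun L r => js.foldl (pvMod heads r) L) PySem.Dict.empty
      (r0 :: rest)).keys.Nodup :=
    nodupA heads (r0 :: rest) js PySem.Dict.empty PySem.Dict.nodup_keys_empty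
  have ndB : (List.foldl (fun L j => L.insert (pvHStr heads j) (galCol (r0 :: rest) j))
      PySem.Dict.empty js).keys.Nodup :=
    PySem.Dict.nodup_keys_foldl_insert_key js (pvHStr heads)
      (fun _ j => galCol (r0 :: rest) j) PySem.Dict.empty PySem.Dict.nodup_keys_empty
  rw [PySem.Dict.items_eq_map_keys _ ndA PySem.Dict.empty,
      PySem.Dict.items_eq_map_keys _ ndB PySem.Dict.empty]
  have hkB : (List.foldl (fun L j => L.insert (pvHStr heads j) (galCol (r0 :: rest) j))
      PySem.Dict.empty js).keys
      = PySem.Set.update (PySem.Dict.empty (ν := PySem.Dict String String)).keys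
          (js.map (pvHStr heads)) :=
    PySem.Dict.keys_foldl_insert_key js (pvHStr heads)
      (fun _ j => galCol (r0 :: rest) j) PySem.Dict.empty
  have hmem : ∀ x ∈ js.map (pvHStr heads),
      x ∈ PySem.Set.update (PySem.Dict.empty (ν := PySem.Dict String String)).keys
        (js.map (pvHStr heads)) := by
    intro x hx
    exact (PySem.Set.mem_update _ _ x).mpr (Or.inr hx)
  have hkA : (List.foldl (fun L r => js.foldl (pvMod heads r) L) PySem.Dict.empty
      (r0 :: rest)).keys
      = PySem.Set.update (PySem.Dict.empty (ν := PySem.Dict String String)).keys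
          (js.map (pvHStr heads)) := by
    rw [keysA_eq heads (r0 :: rest) js PySem.Dict.empty]
    simp only [List.foldl_cons]
    exact fix_fold rest _ _ hmem
  have hgd : ∀ h : String,
      (List.foldl (fun L r => js.foldl (pvMod heads r) L) PySem.Dict.empty
          (r0 :: rest)).getD h PySem.Dict.empty
      = (List.foldl (fun L j => L.insert (pvHStr heads j) (galCol (r0 :: rest) j))
          PySem.Dict.empty js).getD h PySem.Dict.empty := by
    intro h
    rw [grp2 heads (r0 :: rest) js PySem.Dict.empty h,
        ins1 (pvHStr heads) (fun j => galCol (r0 :: rest) j) js PySem.Dict.empty h]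
    exact pw (js.filter (fun j => pvHStr heads j == h)) (r0 :: rest)
  rw [hkA, hkB]
  exact List.map_congr_left (fun k _ => by rw [hgd k])

-- ===== VERDICT (by name: the statement is the Claim_ definition above) =====
theorem getLang_spec : Claim_equal_getLang := by
  intro heads keyvalues _hdom _hpre
  unfold Spec_getLang
  show getLang heads keyvalues = getLang_alt heads keyvalues
  simp only [getLang, getLang_alt]
  have houter : (PySem.List.pyRange 0 (PySem.List.len keyvalues)).foldl
      (fun langs i => galRow heads (PySem.List.pyGetD keyvalues i []) langs) PySem.Dict.empty
      = keyvalues.foldl (fun langs row => galRow heads row langs) PySem.Dict.empty := by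
    have h := PySem.List.foldl_pyRange_pyGetD keyvalues []
      (fun langs row => galRow heads row langs) PySem.Dict.empty (a := 0) le_rfl
    simpa using h
  rw [houter]
  have hrow : (fun (langs : PySem.Dict String (PySem.Dict String String)) row =>
      galRow heads row langs)
      = fun langs row => (PySem.List.pyRange 1 (PySem.List.len heads)).foldl
          (pvMod heads row) langs := by
    funext L r
    exact galRow_eq heads r L
  rw [hrow]
  cases keyvalues with
  | nil => rfl
  | cons r rest =>
      rw [main_dict heads (r :: rest) (PySem.List.pyRange 1 (PySem.List.len heads))
        (List.cons_ne_nil r rest)]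
      rfl
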